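-- pv_equiv track=rewrite | github.com/crmarsh/advent_of_code | 2015/day11/code.py | check_rule2
-- ===== SOURCE A (Python) =====
-- def check_rule2(coded):
--     """Passwords must contain at least two different, non-overlapping pairs of letters, like aa, bb, or zz"""
--     i = 0
--     n = len(coded) - 1
--     pairs = 0
--     while i < n:
--         if coded[i] == coded[i + 1]:
--             pairs += 1
--             i += 2
--         else:
--             i += 1
--     return pairs > 1
-- ===== SOURCE B (Python) =====
-- def check_rule2(coded):
--     """Passwords must contain at least two different, non-overlapping pairs of letters, like aa, bb, or zz"""
--     positions = [i for i in range(len(coded) - 1) if coded[i] == coded[i + 1]]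
--     return bool(positions) and positions[-1] - positions[0] >= 2
-- ===== Notes on version B (the rewrite author's own statement) =====
-- stated objective: simpler
-- what changed: Instead of a greedy scan that counts non-overlapping pairs with skip-by-2, B collects all (possibly overlapping) adjacent-equal positions and returns whether the first and last such positions are at least 2 apart, which is provably equivalent to the greedy count exceeding 1.
import Mathlib
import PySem

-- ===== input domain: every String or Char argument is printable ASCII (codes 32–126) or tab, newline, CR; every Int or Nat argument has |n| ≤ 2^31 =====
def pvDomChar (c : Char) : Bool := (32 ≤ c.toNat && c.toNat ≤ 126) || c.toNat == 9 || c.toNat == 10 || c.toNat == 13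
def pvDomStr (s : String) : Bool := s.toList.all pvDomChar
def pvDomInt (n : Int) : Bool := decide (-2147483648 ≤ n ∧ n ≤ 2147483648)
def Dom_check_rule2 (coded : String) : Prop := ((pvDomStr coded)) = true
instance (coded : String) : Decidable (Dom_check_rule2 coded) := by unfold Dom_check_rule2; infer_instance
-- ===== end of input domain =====

-- B replaces A's greedy skip-by-2 pair counter by an extremal criterion: it lists every
-- adjacent-equal position (overlaps included) and checks the first and last are ≥ 2 apart;
-- same return value, a shorter and plainer formulation.

-- ===== PORT A =====
-- A's while loop: i runs over indices, n = len(coded) - 1; pairs counts matches.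
-- (Python's n = len-1 is -1 on the empty string; the loop body never runs there either way,
-- and all indexing in the body is in range since i < n, so List.getD is exact here.)
def checkLoopA (s : List Char) (n : Nat) (i : Nat) (pairs : Nat) : Nat :=
  if i < n then
    if s.getD i ' ' == s.getD (i + 1) ' ' then
      checkLoopA s n (i + 2) (pairs + 1)
    else
      checkLoopA s n (i + 1) pairs
  else
    pairs
termination_by n - i

def check_rule2 (coded : String) : Bool :=
  let s := coded.toList
  checkLoopA s (s.length - 1) 0 0 > 1

-- ===== PORT B =====
-- Source B: positions = [i for i in range(len(coded)-1) if coded[i] == coded[i+1]];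
--       return bool(positions) and positions[-1] - positions[0] >= 2
-- (all indexing is in range, so List.getD is exact; positions[-1]/positions[0] on the
-- nonempty list are getLastD/headD, and the Nat subtraction agrees with Python's int
-- subtraction here since the list is increasing)
def check_rule2_alt (coded : String) : Bool :=
  let s := coded.toList
  let positions := (List.range (s.length - 1)).filter
    (fun i => s.getD i ' ' == s.getD (i + 1) ' ')
  !positions.isEmpty && decide (2 ≤ positions.getLastD 0 - positions.headD 0)

-- ===== PRECONDITION & SPEC =====
def Spec_check_rule2 (coded : String) (out : Bool) : Prop := out = check_rule2_alt coded
instance (coded : String) (out : Bool) : Decidable (Spec_check_rule2 coded out) := by unfold Spec_check_rule2; infer_instance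

-- ===== CLAIM (what is proved, stated in full; the proofs are below) =====
def Claim_equal_check_rule2 : Prop := ∀ (coded : String), Dom_check_rule2 coded → Spec_check_rule2 coded (check_rule2 coded)

-- ===== LEMMAS AND PROOFS =====

-- what A's greedy loop collects, in recursive form (proof-only helper)
def findPairsB : List Char → List Char
  | a :: b :: rest => if a == b then a :: findPairsB rest else findPairsB (b :: rest)
  | _ => []

-- "there is an adjacent-equal pair at position i"
def pairAt (s : List Char) (i : Nat) : Prop :=
  i + 1 < s.length ∧ s.getD i ' ' = s.getD (i + 1) ' '

theorem findPairsB_short (s : List Char) (h : s.length ≤ 1) : findPairsB s = [] := by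
  match s with
  | [] => rfl
  | [a] => rfl
  | a :: b :: rest => simp at h

theorem checkLoopA_eq (s : List Char) (i pairs : Nat) :
    checkLoopA s (s.length - 1) i pairs = pairs + (findPairsB (s.drop i)).length := by
  by_cases h : i < s.length - 1
  · have hi : i < s.length := by omega
    have hi1 : i + 1 < s.length := by omega
    have hd : s.drop i = s[i] :: s.drop (i + 1) := List.drop_eq_getElem_cons hi
    have hd1 : s.drop (i + 1) = s[i + 1] :: s.drop (i + 2) := List.drop_eq_getElem_cons hi1
    have hg : s.getD i ' ' = s[i] := by simp [List.getD, List.getElem?_eq_getElem hi]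
    have hg1 : s.getD (i + 1) ' ' = s[i + 1] := by
      simp [List.getD, List.getElem?_eq_getElem hi1]
    rw [checkLoopA, if_pos h, hg, hg1, hd, hd1]
    by_cases he : s[i] = s[i + 1]
    · rw [if_pos (by simp [he]), checkLoopA_eq s (i + 2) (pairs + 1)]
      simp [findPairsB, he]
      omega
    · rw [if_neg (by simp [he]), checkLoopA_eq s (i + 1) pairs, findPairsB, if_neg (by simp [he]), hd1]
  · rw [checkLoopA, if_neg h]
    rw [findPairsB_short _ (by simp; omega)]
    rfl
termination_by s.length - i

theorem pairAt_cons (a : Char) (s : List Char) (i : Nat) :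
    pairAt (a :: s) (i + 1) ↔ pairAt s i := by
  simp [pairAt, List.getD]

-- greedy finds a pair iff one exists
theorem findPairsB_one (s : List Char) :
    1 ≤ (findPairsB s).length ↔ ∃ i, pairAt s i := by
  match s with
  | [] => simp [findPairsB, pairAt]
  | [a] => simp [findPairsB, pairAt]
  | a :: b :: rest =>
    by_cases he : a = b
    · have hfe : findPairsB (a :: b :: rest) = a :: findPairsB rest := by
        simp [findPairsB, he]
      rw [hfe]
      constructor
      · intro _; exact ⟨0, ⟨by simp, by simp [List.getD, he]⟩⟩
      · intro _; simp
    · have hfe : findPairsB (a :: b :: rest) = findPairsB (b :: rest) := by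
        simp [findPairsB, he]
      rw [hfe, findPairsB_one (b :: rest)]
      constructor
      · rintro ⟨i, hp⟩; exact ⟨i + 1, (pairAt_cons a _ i).mpr hp⟩
      · rintro ⟨i, hp⟩
        match i with
        | 0 => exact absurd hp.2 (by simp [List.getD, he])
        | i + 1 => exact ⟨i, (pairAt_cons a _ i).mp hp⟩

-- greedy finds two pairs iff two disjoint pairs exist
theorem findPairsB_two (s : List Char) :
    2 ≤ (findPairsB s).length ↔ ∃ i j, pairAt s i ∧ pairAt s j ∧ i + 2 ≤ j := by
  match s with
  | [] => simp [findPairsB, pairAt]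
  | [a] => simp [findPairsB, pairAt]
  | a :: b :: rest =>
    by_cases he : a = b
    · have hfe : findPairsB (a :: b :: rest) = a :: findPairsB rest := by
        simp [findPairsB, he]
      rw [hfe]
      constructor
      · intro h
        have h1 : 1 ≤ (findPairsB rest).length := by
          simp only [List.length_cons] at h; omega
        obtain ⟨k, hk⟩ := (findPairsB_one rest).mp h1
        refine ⟨0, k + 2, ⟨by simp, by simp [List.getD, he]⟩, ?_, by omega⟩
        exact (pairAt_cons a _ (k + 1)).mpr ((pairAt_cons b _ k).mpr hk)
      · rintro ⟨i, j, _, hj, hij⟩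
        obtain ⟨k, rfl⟩ : ∃ k, j = k + 2 := ⟨j - 2, by omega⟩
        have hk : pairAt rest k :=
          (pairAt_cons b _ k).mp ((pairAt_cons a _ (k + 1)).mp hj)
        have := (findPairsB_one rest).mpr ⟨k, hk⟩
        simp only [List.length_cons]; omega
    · have hfe : findPairsB (a :: b :: rest) = findPairsB (b :: rest) := by
        simp [findPairsB, he]
      rw [hfe, findPairsB_two (b :: rest)]
      constructor
      · rintro ⟨i, j, hi, hj, hij⟩
        exact ⟨i + 1, j + 1, (pairAt_cons a _ i).mpr hi, (pairAt_cons a _ j).mpr hj, by omega⟩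
      · rintro ⟨i, j, hi, hj, hij⟩
        match i with
        | 0 => exact absurd hi.2 (by simp [List.getD, he])
        | i + 1 =>
          obtain ⟨k, rfl⟩ : ∃ k, j = k + 1 := ⟨j - 1, by omega⟩
          exact ⟨i, k, (pairAt_cons a _ i).mp hi, (pairAt_cons a _ k).mp hj, by omega⟩

theorem headD_mem' {l : List Nat} (d : Nat) (h : l ≠ []) : l.headD d ∈ l := by
  cases l with
  | nil => simp at h
  | cons a t => simp

theorem headD_le_of_mem {l : List Nat} {x : Nat} (hs : l.Pairwise (· < ·)) (hx : x ∈ l) :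
    l.headD 0 ≤ x := by
  cases l with
  | nil => simp at hx
  | cons h t =>
    rcases List.mem_cons.mp hx with rfl | hxt
    · simp
    · have := (List.pairwise_cons.mp hs).1 x hxt
      simp; omega

theorem getLastD_mem' {l : List Nat} (d : Nat) (h : l ≠ []) : l.getLastD d ∈ l := by
  induction l generalizing d with
  | nil => simp at h
  | cons a t ih =>
    cases t with
    | nil => simp
    | cons b u => simpa using Or.inr (ih b (by simp))

theorem le_getLastD_of_mem {l : List Nat} {x : Nat} (d : Nat) (hs : l.Pairwise (· < ·))
    (hx : x ∈ l) : x ≤ l.getLastD d := by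
  induction l generalizing d with
  | nil => simp at hx
  | cons y t ih =>
    cases t with
    | nil => simp at hx ⊢; omega
    | cons b u =>
      rw [List.getLastD_cons]
      rcases List.mem_cons.mp hx with h0 | hxt
      · have hm := getLastD_mem' (l := b :: u) y (by simp)
        have h2 := (List.pairwise_cons.mp hs).1 _ hm
        omega
      · exact ih y (List.pairwise_cons.mp hs).2 hxt

theorem mem_positions (s : List Char) (i : Nat) :
    i ∈ (List.range (s.length - 1)).filter
        (fun i => s.getD i ' ' == s.getD (i + 1) ' ') ↔ pairAt s i := by
  simp [List.mem_filter, pairAt]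
  omega

theorem alt_iff (s : List Char) :
    ((!((List.range (s.length - 1)).filter
        (fun i => s.getD i ' ' == s.getD (i + 1) ' ')).isEmpty &&
      decide (2 ≤ ((List.range (s.length - 1)).filter
        (fun i => s.getD i ' ' == s.getD (i + 1) ' ')).getLastD 0 -
        ((List.range (s.length - 1)).filter
        (fun i => s.getD i ' ' == s.getD (i + 1) ' ')).headD 0)) = true) ↔
    ∃ i j, pairAt s i ∧ pairAt s j ∧ i + 2 ≤ j := by
  set positions := (List.range (s.length - 1)).filter
    (fun i => s.getD i ' ' == s.getD (i + 1) ' ') with hpos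
  have hsorted : positions.Pairwise (· < ·) :=
    List.Pairwise.filter _ (List.pairwise_lt_range)
  constructor
  · rintro h
    simp only [Bool.and_eq_true, Bool.not_eq_true', List.isEmpty_eq_false_iff,
      decide_eq_true_eq] at h
    obtain ⟨hne, hdist⟩ := h
    have hh : positions.headD 0 ∈ positions := headD_mem' 0 hne
    have hl : positions.getLastD 0 ∈ positions := getLastD_mem' 0 hne
    have hle := headD_le_of_mem hsorted hl
    exact ⟨positions.headD 0, positions.getLastD 0,
      (mem_positions s _).mp hh, (mem_positions s _).mp hl, by omega⟩
  · rintro ⟨i, j, hi, hj, hij⟩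
    have hmi : i ∈ positions := (mem_positions s i).mpr hi
    have hmj : j ∈ positions := (mem_positions s j).mpr hj
    have h1 := headD_le_of_mem hsorted hmi
    have h2 := le_getLastD_of_mem 0 hsorted hmj
    simp only [Bool.and_eq_true, Bool.not_eq_true', List.isEmpty_eq_false_iff,
      decide_eq_true_eq]
    refine ⟨?_, by omega⟩
    intro h0
    rw [h0] at hmi
    simp at hmi

-- ===== VERDICT (by name: the statement is the Claim_ definition above) =====
theorem check_rule2_spec : Claim_equal_check_rule2 := by
  intro coded _
  unfold Spec_check_rule2 check_rule2 check_rule2_alt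
  simp only
  rw [Bool.eq_iff_iff]
  rw [checkLoopA_eq coded.toList 0 0]
  rw [alt_iff coded.toList]
  rw [← findPairsB_two coded.toList]
  simp only [List.drop_zero, Nat.zero_add, gt_iff_lt, decide_eq_true_eq]
  omega
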